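-- pv_equiv track=rewrite | github.com/hiwhite2772/Python | Extra Practice/luyentap2.py | count_non_zero_digit
-- ===== SOURCE A (Python) =====
-- def count_non_zero_digit(n):
--     if n < 10:
--         return 0 if n == 0 else 1
--     last = n % 10
--     if last != 0:
--         return 1 + count_non_zero_digit(n // 10)
--     else:
--         return count_non_zero_digit(n // 10)
-- ===== SOURCE B (Python) =====
-- def count_non_zero_digit(n):
--     count = 0
--     while n >= 10:
--         if n % 10 != 0:
--             count += 1
--         n //= 10
--     return count + (0 if n == 0 else 1)
-- ===== Notes on version B (the rewrite author's own statement) =====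
-- stated objective: simpler
-- what changed: Replaced the recursion with an explicit iterative while-loop carrying a running count, adding the base-case contribution after the loop.
import Mathlib
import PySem

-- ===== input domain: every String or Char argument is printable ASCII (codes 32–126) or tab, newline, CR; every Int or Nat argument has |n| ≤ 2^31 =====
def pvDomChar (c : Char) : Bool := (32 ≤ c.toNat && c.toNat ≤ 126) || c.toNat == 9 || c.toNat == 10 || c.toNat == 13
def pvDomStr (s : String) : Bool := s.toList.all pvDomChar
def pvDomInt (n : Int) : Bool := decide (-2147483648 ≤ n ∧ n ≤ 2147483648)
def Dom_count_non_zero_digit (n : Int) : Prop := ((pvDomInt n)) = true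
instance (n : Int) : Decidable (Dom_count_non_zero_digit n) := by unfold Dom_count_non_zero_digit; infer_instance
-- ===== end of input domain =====

-- B replaces A's recursion with an explicit while-loop over a running count (objective: simpler).


-- ===== PORT A =====
def count_non_zero_digit (n : Int) : Int :=
  if n < 10 then (if n = 0 then 0 else 1)
  else
    let last := PySem.Int.mod n 10
    if last ≠ 0 then 1 + count_non_zero_digit (PySem.Int.floordiv n 10)
    else count_non_zero_digit (PySem.Int.floordiv n 10)
termination_by n.toNat
decreasing_by
  all_goals
    have := PySem.Int.floordiv_eq_ediv_of_pos (a := n) (b := 10) (by omega)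
    rw [this]
    have h1 : n / 10 < n := by
      have : 0 < n := by omega
      omega
    have h2 : 0 ≤ n / 10 := by omega
    omega

-- ===== PORT B =====
-- the while-loop: state (n, count); returns (final n, final count)
def cnzdLoop (n count : Int) : Int × Int :=
  if 10 ≤ n then
    cnzdLoop (PySem.Int.floordiv n 10)
      (if PySem.Int.mod n 10 ≠ 0 then count + 1 else count)
  else (n, count)
termination_by n.toNat
decreasing_by
  have := PySem.Int.floordiv_eq_ediv_of_pos (a := n) (b := 10) (by omega)
  rw [this]
  omega

def count_non_zero_digit_alt (n : Int) : Int :=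
  let r := cnzdLoop n 0
  r.2 + (if r.1 = 0 then 0 else 1)

-- ===== PRECONDITION & SPEC =====
def Spec_count_non_zero_digit (n : Int) (out : Int) : Prop := out = count_non_zero_digit_alt n
instance (n : Int) (out : Int) : Decidable (Spec_count_non_zero_digit n out) := by unfold Spec_count_non_zero_digit; infer_instance

-- ===== CLAIM (what is proved, stated in full; the proofs are below) =====
def Claim_equal_count_non_zero_digit : Prop := ∀ (n : Int), Dom_count_non_zero_digit n → Spec_count_non_zero_digit n (count_non_zero_digit n)

-- ===== LEMMAS AND PROOFS =====

-- loop invariant: running count accumulates; total = count + A's result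
theorem cnzdLoop_eq (k : Nat) : ∀ (n count : Int), n.toNat ≤ k →
    (cnzdLoop n count).2 + (if (cnzdLoop n count).1 = 0 then 0 else 1)
      = count + count_non_zero_digit n := by
  induction k with
  | zero =>
    intro n count hk
    rw [cnzdLoop, count_non_zero_digit]
    have hn : n < 10 := by omega
    simp only [if_pos hn, if_neg (by omega : ¬ 10 ≤ n)]
  | succ k ih =>
    intro n count hk
    rw [cnzdLoop, count_non_zero_digit]
    by_cases h10 : 10 ≤ n
    · have hfd := PySem.Int.floordiv_eq_ediv_of_pos (a := n) (b := 10) (by omega)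
      have hle : (PySem.Int.floordiv n 10).toNat ≤ k := by rw [hfd]; omega
      rw [if_pos h10, if_neg (by omega : ¬ n < 10)]
      rw [ih _ _ hle]
      by_cases hm : PySem.Int.mod n 10 ≠ 0
      · rw [if_pos hm, if_pos hm]; ring
      · rw [if_neg hm, if_neg hm]
    · rw [if_neg h10, if_pos (by omega : n < 10)]

-- ===== VERDICT (by name: the statement is the Claim_ definition above) =====
theorem count_non_zero_digit_spec : Claim_equal_count_non_zero_digit := by
  intro n _
  unfold Spec_count_non_zero_digit count_non_zero_digit_alt
  have h := cnzdLoop_eq n.toNat n 0 (le_refl _)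
  show count_non_zero_digit n = (cnzdLoop n 0).2 + (if (cnzdLoop n 0).1 = 0 then 0 else 1)
  linarith [h]
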